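-- pv_equiv track=rewrite | github.com/LiYomi/sglang | python/sglang/srt/multimodal/processors/voxtral.py | _find_audio_offsets
-- ===== SOURCE A (Python) =====
-- from typing import Any, Dict, List, Optional
--
-- def _find_audio_offsets(input_ids: List[int], audio_token_id: int) -> List[tuple]:
--     """Find consecutive runs of audio_token_id in input_ids."""
--     offsets = []
--     start = None
--     for i, tok_id in enumerate(input_ids):
--         if tok_id == audio_token_id:
--             if start is None:
--                 start = i
--         elif start is not None:
--             offsets.append((start, i - 1))
--             start = None
--     if start is not None:
--         offsets.append((start, len(input_ids) - 1))
--     return offsets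
-- ===== SOURCE B (Python) =====
-- from itertools import groupby
-- from typing import List
--
--
-- def _find_audio_offsets(input_ids: List[int], audio_token_id: int) -> List[tuple]:
--     """Find consecutive runs of audio_token_id in input_ids (groupby + length arithmetic)."""
--     offsets = []
--     pos = 0
--     for key, group in groupby(input_ids):
--         length = len(list(group))
--         if key == audio_token_id:
--             offsets.append((pos, pos + length - 1))
--         pos += length
--     return offsets
-- ===== Notes on version B (the rewrite author's own statement) =====
-- stated objective: idiomatic
-- what changed: Replaced the stateful start/flush scan (Option start flag, separate trailing-run flush) by itertools.groupby: run offsets are derived from each group's length with a running position counter, so runs of equal tokens are consumed whole and the trailing run needs no special case.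
import Mathlib
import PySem

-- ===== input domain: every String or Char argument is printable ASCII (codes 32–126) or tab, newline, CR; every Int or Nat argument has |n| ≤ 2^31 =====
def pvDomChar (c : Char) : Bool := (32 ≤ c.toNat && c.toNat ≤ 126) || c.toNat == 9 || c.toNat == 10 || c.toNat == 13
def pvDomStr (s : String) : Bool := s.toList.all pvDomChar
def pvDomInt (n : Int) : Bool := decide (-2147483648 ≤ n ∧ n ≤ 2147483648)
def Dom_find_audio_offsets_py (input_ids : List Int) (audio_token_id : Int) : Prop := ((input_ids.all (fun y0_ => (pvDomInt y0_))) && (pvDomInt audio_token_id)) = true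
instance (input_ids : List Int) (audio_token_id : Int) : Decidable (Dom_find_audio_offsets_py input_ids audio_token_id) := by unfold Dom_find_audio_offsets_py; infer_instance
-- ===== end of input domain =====

-- B replaces A's stateful start/flush scan by a groupby-style pass deriving run
-- offsets from group lengths (idiomatic decomposition; same O(n) cost).

-- ===== PORT A =====
-- the enumerate loop with state (offsets, start); on exhaustion at index i = len(input_ids),
-- the trailing flush appends (start, len(input_ids) - 1) = (start, i - 1)
def loopA (aid : Int) : List Int → Int → Option Int → List (Int × Int) → List (Int × Int)
  | [], _, none, offsets => offsets
  | [], i, some s, offsets => offsets ++ [(s, i - 1)]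
  | t :: ts, i, start, offsets =>
    if t = aid then
      match start with
      | none => loopA aid ts (i + 1) (some i) offsets
      | some s => loopA aid ts (i + 1) (some s) offsets
    else
      match start with
      | none => loopA aid ts (i + 1) none offsets
      | some s => loopA aid ts (i + 1) none (offsets ++ [(s, i - 1)])

def find_audio_offsets_py (input_ids : List Int) (audio_token_id : Int) : List (Int × Int) :=
  loopA audio_token_id input_ids 0 none []

-- ===== PORT B =====
-- groupby: take the maximal run of tokens equal to the head, emit (pos, pos+len-1)
-- when the run is the audio token, advance pos by the run length
def groupsB (aid : Int) : List Int → Int → List (Int × Int)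
  | [], _ => []
  | x :: xs, pos =>
    let run := xs.takeWhile (fun y => y == x)
    let rest := xs.dropWhile (fun y => y == x)
    let len : Int := 1 + run.length
    if x = aid then (pos, pos + len - 1) :: groupsB aid rest (pos + len)
    else groupsB aid rest (pos + len)
  termination_by xs _ => xs.length
  decreasing_by
    all_goals
      simp only [List.length_cons]
      exact Nat.lt_succ_of_le (List.length_dropWhile_le _ _)

def find_audio_offsets_py_alt (input_ids : List Int) (audio_token_id : Int) : List (Int × Int) :=
  groupsB audio_token_id input_ids 0

-- ===== PRECONDITION & SPEC =====
def Spec_find_audio_offsets_py (input_ids : List Int) (audio_token_id : Int) (out : List (Int × Int)) : Prop := out = find_audio_offsets_py_alt input_ids audio_token_id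
instance (input_ids : List Int) (audio_token_id : Int) (out : List (Int × Int)) : Decidable (Spec_find_audio_offsets_py input_ids audio_token_id out) := by unfold Spec_find_audio_offsets_py; infer_instance

-- ===== CLAIM (what is proved, stated in full; the proofs are below) =====
def Claim_equal_find_audio_offsets_py : Prop := ∀ (input_ids : List Int) (audio_token_id : Int), Dom_find_audio_offsets_py input_ids audio_token_id → Spec_find_audio_offsets_py input_ids audio_token_id (find_audio_offsets_py input_ids audio_token_id)

-- ===== LEMMAS AND PROOFS =====

-- with no open run, A's loop skips a block of equal non-audio tokens one by one
lemma loopA_skip (aid t : Int) (ht : t ≠ aid) :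
    ∀ (r : List Int), (∀ y ∈ r, y = t) → ∀ (rest : List Int) (i : Int) (acc : List (Int × Int)),
      loopA aid (r ++ rest) i none acc = loopA aid rest (i + r.length) none acc := by
  intro r
  induction r with
  | nil => intro _ rest i acc; simp
  | cons y ys ih =>
    intro hmem rest i acc
    have hy : y = t := hmem y (by simp)
    have hys : ∀ z ∈ ys, z = t := fun z hz => hmem z (by simp [hz])
    simp only [List.cons_append, loopA, hy, if_neg ht]
    rw [ih hys]
    congr 1
    simp [List.length_cons]
    ring

-- the combined invariant: A's loop from any index equals B's groups, for both states
lemma loopA_groupsB (aid : Int) :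
    ∀ (n : ℕ) (xs : List Int), xs.length ≤ n → ∀ (i : Int) (acc : List (Int × Int)),
      (loopA aid xs i none acc = acc ++ groupsB aid xs i) ∧
      (∀ s : Int, loopA aid xs i (some s) acc =
        acc ++ (s, i + (xs.takeWhile (fun y => y == aid)).length - 1) ::
          groupsB aid (xs.dropWhile (fun y => y == aid)) (i + (xs.takeWhile (fun y => y == aid)).length)) := by
  intro n
  induction n with
  | zero =>
    intro xs hxs i acc
    have : xs = [] := List.length_eq_zero_iff.mp (Nat.le_zero.mp hxs)
    subst this
    constructor
    · simp [loopA, groupsB]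
    · intro s; simp [loopA, groupsB]
  | succ n ih =>
    intro xs hxs i acc
    cases xs with
    | nil =>
      constructor
      · simp [loopA, groupsB]
      · intro s; simp [loopA, groupsB]
    | cons t ts =>
      have hts : ts.length ≤ n := Nat.lt_succ_iff.mp (by simpa using hxs)
      by_cases ht : t = aid
      · subst ht
        constructor
        · -- none state, head is the audio token: open a run at i
          simp only [loopA]
          rw [if_pos trivial, (ih ts hts (i + 1) acc).2 i]
          simp only [groupsB, if_true]
          rw [show i + 1 + ((ts.takeWhile (fun y => y == t)).length : Int)
                = i + (1 + ((ts.takeWhile (fun y => y == t)).length : Int)) from by ring]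
        · -- some state, head is the audio token: run continues
          intro s
          simp only [loopA]
          rw [if_pos trivial, (ih ts hts (i + 1) acc).2 s]
          simp only [List.takeWhile_cons, List.dropWhile_cons, beq_self_eq_true, if_true,
            List.length_cons]
          rw [show i + 1 + ((ts.takeWhile (fun y => y == t)).length : Int)
                = i + (((ts.takeWhile (fun y => y == t)).length : Int) + 1) from by ring]
          push_cast
          rfl
      · -- head is not the audio token
        have hnone : ∀ acc' : List (Int × Int), loopA aid ts (i + 1) none acc' = acc' ++ groupsB aid (t :: ts) i := by
          intro acc'
          have hsplit : ts = ts.takeWhile (fun y => y == t) ++ ts.dropWhile (fun y => y == t) :=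
            (List.takeWhile_append_dropWhile).symm
          have hmem : ∀ y ∈ ts.takeWhile (fun y => y == t), y = t := by
            intro y hy
            have := List.mem_takeWhile_imp hy
            simpa using this
          calc loopA aid ts (i + 1) none acc'
              = loopA aid (ts.takeWhile (fun y => y == t) ++ ts.dropWhile (fun y => y == t)) (i + 1) none acc' := by rw [← hsplit]
            _ = loopA aid (ts.dropWhile (fun y => y == t)) (i + 1 + (ts.takeWhile (fun y => y == t)).length) none acc' :=
                loopA_skip aid t ht _ hmem _ _ _
            _ = acc' ++ groupsB aid (ts.dropWhile (fun y => y == t)) (i + 1 + (ts.takeWhile (fun y => y == t)).length) :=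
                (ih _ (le_trans (List.length_dropWhile_le _ _) hts) _ acc').1
            _ = acc' ++ groupsB aid (t :: ts) i := by
                simp only [groupsB, if_neg ht]
                congr 2
                ring
        constructor
        · simp only [loopA, if_neg ht]
          exact hnone acc
        · intro s
          simp only [loopA, if_neg ht]
          rw [hnone (acc ++ [(s, i - 1)])]
          have htw : (t :: ts).takeWhile (fun y => y == aid) = [] := by
            simp [ht]
          have hdw : (t :: ts).dropWhile (fun y => y == aid) = t :: ts := by
            simp [ht]
          rw [htw, hdw]
          simp

-- ===== VERDICT (by name: the statement is the Claim_ definition above) =====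
theorem find_audio_offsets_py_spec : Claim_equal_find_audio_offsets_py := by
  intro input_ids audio_token_id _
  unfold Spec_find_audio_offsets_py find_audio_offsets_py find_audio_offsets_py_alt
  simpa using (loopA_groupsB audio_token_id input_ids.length input_ids le_rfl 0 []).1
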